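-- pv_equiv track=rewrite | github.com/MischaDy/AoC-2022 | Day8/day8.py | get_visibles_r2l
-- ===== SOURCE A (Python) =====
-- from typing import Set, Tuple
--
-- def get_visibles_r2l(heights) -> Set[Tuple[int, int]]:
--     visibles = set()
--     for row, line in enumerate(heights):
--         cur_row_max = float('-inf')
--         indexed_line = list(enumerate(line))
--         for col, height in reversed(indexed_line):
--             if height > cur_row_max:
--                 visibles.add((row, col))
--                 cur_row_max = height
--     return visibles
-- ===== SOURCE B (Python) =====
-- def get_visibles_r2l(heights):
--     visibles = set()
--     for row, line in enumerate(heights):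
--         line = list(line)
--         n = len(line)
--         for col in range(n - 1, -1, -1):
--             if all(line[col] > line[c] for c in range(col + 1, n)):
--                 visibles.add((row, col))
--     return visibles
-- ===== Notes on version B (the rewrite author's own statement) =====
-- stated objective: alternative
-- what changed: Replaces the right-to-left running-maximum accumulator with a direct definition-style check: a tree is visible iff it is strictly taller than every tree in its right suffix, tested by a nested scan per column.
import Mathlib
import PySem

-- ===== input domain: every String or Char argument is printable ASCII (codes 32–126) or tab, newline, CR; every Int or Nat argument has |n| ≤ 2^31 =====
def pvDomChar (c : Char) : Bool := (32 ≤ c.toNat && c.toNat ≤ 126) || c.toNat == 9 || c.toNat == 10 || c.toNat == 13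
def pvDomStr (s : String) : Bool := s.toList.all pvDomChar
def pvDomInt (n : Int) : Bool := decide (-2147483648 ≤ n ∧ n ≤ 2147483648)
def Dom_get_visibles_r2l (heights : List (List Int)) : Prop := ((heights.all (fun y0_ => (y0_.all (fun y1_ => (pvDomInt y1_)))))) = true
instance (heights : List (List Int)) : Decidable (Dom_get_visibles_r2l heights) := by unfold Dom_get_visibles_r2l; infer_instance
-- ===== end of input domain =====

-- B replaces A's right-to-left running-maximum accumulator by the direct visibility test
-- (strictly taller than every tree of the right suffix), a nested scan per column (alternative, not faster).

-- ===== PORT A =====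
-- cur_row_max = float('-inf') is modelled as `none : Option Int` (every int compares greater than it).
def get_visibles_r2l (heights : List (List Int)) : List (Int × Int) :=
  (PySem.List.enumerate heights).foldl (fun vis rl =>
    (((PySem.List.enumerate rl.2).reverse).foldl
      (fun (st : List (Int × Int) × Option Int) (ch : Int × Int) =>
        match st.2 with
        | none => (PySem.Set.add st.1 (rl.1, ch.1), some ch.2)
        | some m => if ch.2 > m then (PySem.Set.add st.1 (rl.1, ch.1), some ch.2) else st)
      (vis, (none : Option Int))).1) PySem.Set.empty

-- ===== PORT B =====
def get_visibles_r2l_alt (heights : List (List Int)) : List (Int × Int) :=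
  (PySem.List.enumerate heights).foldl (fun vis rl =>
    let n : Int := rl.2.length
    (PySem.List.pyRange (n - 1) (-1) (-1)).foldl (fun vis col =>
      if (PySem.List.pyRange (col + 1) n 1).all
           (fun c => decide (PySem.List.pyGetD rl.2 col 0 > PySem.List.pyGetD rl.2 c 0)) then
        PySem.Set.add vis (rl.1, col)
      else vis) vis) PySem.Set.empty

-- ===== PRECONDITION & SPEC =====
def Spec_get_visibles_r2l (heights : List (List Int)) (out : List (Int × Int)) : Prop := out = get_visibles_r2l_alt heights
instance (heights : List (List Int)) (out : List (Int × Int)) : Decidable (Spec_get_visibles_r2l heights out) := by unfold Spec_get_visibles_r2l; infer_instance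

-- ===== CLAIM (what is proved, stated in full; the proofs are below) =====
def Claim_equal_get_visibles_r2l : Prop := ∀ (heights : List (List Int)), Dom_get_visibles_r2l heights → Spec_get_visibles_r2l heights (get_visibles_r2l heights)

-- ===== LEMMAS AND PROOFS =====

-- suffix maximum, as an Option (none for the empty suffix = A's -inf)
def pvSmax : List Int → Option Int
  | [] => none
  | a :: t => some (match pvSmax t with | none => a | some m => max a m)

lemma pvSmax_gt (h : Int) : ∀ l : List Int,
    (match pvSmax l with | none => true | some m => decide (h > m))
      = l.all (fun x => decide (h > x)) := by
  intro l
  induction l with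
  | nil => rfl
  | cons a t ih =>
    simp only [pvSmax, List.all_cons]
    cases ht : pvSmax t with
    | none =>
      rw [ht] at ih
      simp [← ih]
    | some m =>
      rw [ht] at ih
      simp only [← ih]
      by_cases hgt : h > max a m
      · have h1 : h > a := lt_of_le_of_lt (le_max_left a m) hgt
        have h2 : h > m := lt_of_le_of_lt (le_max_right a m) hgt
        simp [hgt, h1, h2]
      · have : ¬ (h > a) ∨ ¬ (h > m) := by
          by_contra hc
          push_neg at hc
          exact hgt (max_lt hc.1 hc.2)
        rcases this with h1 | h2
        · simp [hgt, h1]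
        · simp [hgt, h2]

-- the two per-column step functions
def pvStepA (row : Int) (ln : List Int) (st : List (Int × Int) × Option Int) (j : Int) :
    List (Int × Int) × Option Int :=
  match st.2 with
  | none => (PySem.Set.add st.1 (row, j), some (PySem.List.pyGetD ln j 0))
  | some m => if PySem.List.pyGetD ln j 0 > m then
      (PySem.Set.add st.1 (row, j), some (PySem.List.pyGetD ln j 0)) else st

def pvStepB (row : Int) (ln : List Int) (vis : List (Int × Int)) (j : Int) : List (Int × Int) :=
  if (PySem.List.pyRange (j + 1) (ln.length : Int) 1).all
       (fun c => decide (PySem.List.pyGetD ln j 0 > PySem.List.pyGetD ln c 0)) then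
    PySem.Set.add vis (row, j)
  else vis

lemma pvAll_suffix (ln : List Int) (k : Nat) (h : Int) :
    (PySem.List.pyRange ((k : Int) + 1) (ln.length : Int) 1).all
        (fun c => decide (h > PySem.List.pyGetD ln c 0))
      = (ln.drop (k + 1)).all (fun x => decide (h > x)) := by
  have hmap := PySem.List.map_pyGetD_pyRange' (xs := ln) (a := (k : Int) + 1) (d := 0)
    (by positivity)
  rw [show ((k : Int) + 1).toNat = k + 1 by omega] at hmap
  rw [← hmap, List.all_map]
  rfl

-- core induction: processing columns k-1 … 0, A's fold started with the suffix max of drop k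
-- produces the same visible set as B's fold.
lemma pvRowAux (row : Int) (ln : List Int) (k : Nat) (hk : k ≤ ln.length) :
    ∀ vis : List (Int × Int),
      (((PySem.List.pyRange 0 (k : Int) 1).reverse).foldl (pvStepA row ln)
          (vis, pvSmax (ln.drop k))).1
        = ((PySem.List.pyRange 0 (k : Int) 1).reverse).foldl (pvStepB row ln) vis := by
  induction k with
  | zero =>
    intro vis
    rw [PySem.List.pyRange_one_eq_nil (by norm_num)]
    rfl
  | succ k ih =>
    intro vis
    have hk' : k ≤ ln.length := Nat.le_of_succ_le hk
    have hklt : k < ln.length := hk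
    have hrange : PySem.List.pyRange 0 ((k + 1 : Nat) : Int) 1
        = PySem.List.pyRange 0 (k : Int) 1 ++ [(k : Int)] := by
      push_cast
      exact PySem.List.pyRange_one_succ_right (by positivity)
    rw [hrange, List.reverse_append, List.reverse_singleton, List.singleton_append,
        List.foldl_cons, List.foldl_cons]
    have hget : PySem.List.pyGetD ln (k : Int) 0 = (ln[k]?.getD 0) := by
      simp [PySem.List.pyGetD_natCast, List.getD_eq_getElem?_getD]
    have hdrop : ln.drop k = (ln[k]?.getD 0) :: ln.drop (k + 1) := by
      simp only [List.getElem?_eq_getElem hklt, Option.getD_some]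
      exact List.drop_eq_getElem_cons hklt
    -- the column-k step of each side
    have hcond := pvAll_suffix ln k ((ln[k]?.getD 0))
    have hBstep : pvStepB row ln vis (k : Int)
        = (if (ln.drop (k + 1)).all (fun x => decide ((ln[k]?.getD 0) > x))
            then PySem.Set.add vis (row, (k : Int)) else vis) := by
      rw [pvStepB, hget, hcond]
    cases hsm : pvSmax (ln.drop (k + 1)) with
    | none =>
      have hempty : ln.drop (k + 1) = [] := by
        cases hd : ln.drop (k + 1) with
        | nil => rfl
        | cons a t => rw [hd] at hsm; simp [pvSmax] at hsm
      have hA : pvStepA row ln (vis, none) (k : Int)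
          = (PySem.Set.add vis (row, (k : Int)), pvSmax (ln.drop k)) := by
        simp only [pvStepA]
        rw [hget, hdrop]
        simp [pvSmax, hsm]
      rw [hA, ih hk', hBstep, hempty]
      simp
    | some m =>
      have hiff := pvSmax_gt ((ln[k]?.getD 0)) (ln.drop (k + 1))
      rw [hsm] at hiff
      simp only [] at hiff
      by_cases hgt : (ln[k]?.getD 0) > m
      · have hmax : pvSmax (ln.drop k) = some ((ln[k]?.getD 0)) := by
          rw [hdrop]
          simp [pvSmax, hsm, max_eq_left (le_of_lt hgt)]
        have hA : pvStepA row ln (vis, some m) (k : Int)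
            = (PySem.Set.add vis (row, (k : Int)), pvSmax (ln.drop k)) := by
          simp only [pvStepA]
          rw [hget, hmax]
          simp [hgt]
        have hB : pvStepB row ln vis (k : Int) = PySem.Set.add vis (row, (k : Int)) := by
          rw [hBstep, ← hiff]
          simp [hgt]
        rw [hA, hB, ih hk']
      · have hmax : pvSmax (ln.drop k) = some m := by
          rw [hdrop]
          simp [pvSmax, hsm, max_eq_right (by omega : (ln[k]?.getD 0) ≤ m)]
        have hA : pvStepA row ln (vis, some m) (k : Int) = (vis, pvSmax (ln.drop k)) := by
          simp only [pvStepA]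
          rw [hget, hmax]
          simp [hgt]
        have hB : pvStepB row ln vis (k : Int) = vis := by
          rw [hBstep, ← hiff]
          simp [hgt]
        rw [hA, hB, ih hk']

-- per-row equality: A's reversed-enumerate running-max loop = B's countdown suffix-scan loop
lemma pvRow_eq (row : Int) (ln : List Int) (vis : List (Int × Int)) :
    (((PySem.List.enumerate ln).reverse).foldl
      (fun (st : List (Int × Int) × Option Int) (ch : Int × Int) =>
        match st.2 with
        | none => (PySem.Set.add st.1 (row, ch.1), some ch.2)
        | some m => if ch.2 > m then (PySem.Set.add st.1 (row, ch.1), some ch.2) else st)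
      (vis, (none : Option Int))).1
      = (PySem.List.pyRange ((ln.length : Int) - 1) (-1) (-1)).foldl (pvStepB row ln) vis := by
  have henum := PySem.List.enumerate_eq_map_pyRange (xs := ln) (d := 0)
  have hrev : PySem.List.pyRange ((ln.length : Int) - 1) (-1) (-1)
      = (PySem.List.pyRange 0 (ln.length : Int) 1).reverse := by
    rw [PySem.List.pyRange_neg_one_eq_reverse]
    norm_num
  have hA : (((PySem.List.enumerate ln).reverse).foldl
      (fun (st : List (Int × Int) × Option Int) (ch : Int × Int) =>
        match st.2 with
        | none => (PySem.Set.add st.1 (row, ch.1), some ch.2)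
        | some m => if ch.2 > m then (PySem.Set.add st.1 (row, ch.1), some ch.2) else st)
      (vis, (none : Option Int)))
      = ((PySem.List.pyRange 0 (ln.length : Int) 1).reverse).foldl (pvStepA row ln)
          (vis, (none : Option Int)) := by
    rw [henum, ← List.map_reverse, List.foldl_map]
    rfl
  have haux := pvRowAux row ln ln.length (le_refl _) vis
  rw [List.drop_length] at haux
  rw [hA, hrev]
  exact haux

-- ===== VERDICT (by name: the statement is the Claim_ definition above) =====
theorem get_visibles_r2l_spec : Claim_equal_get_visibles_r2l := by
  intro heights _
  unfold Spec_get_visibles_r2l get_visibles_r2l get_visibles_r2l_alt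
  congr 1
  funext vis rl
  exact pvRow_eq rl.1 rl.2 vis
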